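-- pv_equiv track=rewrite | github.com/Yoimiya42/Tableau | tableau_copy.py | find_main_connective
-- ===== SOURCE A (Python) =====
-- def find_main_connective(s):
--     depth = 0
--     i = 0
--     while i < len(s):
--         ch = s[i]
--         if ch == '(':
--             depth += 1
--             i += 1
--             continue
--         if ch == ')':
--             depth -= 1
--             i += 1
--             continue
--         if depth == 0:
--             # implication
--             if s.startswith('->', i):
--                 return i, '->'
--             # disjunction
--             if s.startswith('\\/', i):
--                 return i, '\\/'
--             # conjunction
--             if ch == '&':
--                 return i, '&'
--         i += 1
--     return None, None
-- ===== SOURCE B (Python) =====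
-- def find_main_connective(s):
--     # two passes: precompute nesting depth at each index, then scan for the
--     # first top-level connective
--     depths = []
--     d = 0
--     for ch in s:
--         depths.append(d)
--         if ch == '(':
--             d += 1
--         elif ch == ')':
--             d -= 1
--     for i, d0 in enumerate(depths):
--         if d0 == 0:
--             if s.startswith('->', i):
--                 return i, '->'
--             if s.startswith('\\/', i):
--                 return i, '\\/'
--             if s[i] == '&':
--                 return i, '&'
--     return None, None
-- ===== Notes on version B (the rewrite author's own statement) =====
-- stated objective: alternative
-- what changed: Replaces A's single while-loop that interleaves depth bookkeeping with connective tests by a two-pass table-then-scan: one pass precomputes the nesting depth at every index, a second pass scans for the first index of depth 0 that starts a connective.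
import Mathlib
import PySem

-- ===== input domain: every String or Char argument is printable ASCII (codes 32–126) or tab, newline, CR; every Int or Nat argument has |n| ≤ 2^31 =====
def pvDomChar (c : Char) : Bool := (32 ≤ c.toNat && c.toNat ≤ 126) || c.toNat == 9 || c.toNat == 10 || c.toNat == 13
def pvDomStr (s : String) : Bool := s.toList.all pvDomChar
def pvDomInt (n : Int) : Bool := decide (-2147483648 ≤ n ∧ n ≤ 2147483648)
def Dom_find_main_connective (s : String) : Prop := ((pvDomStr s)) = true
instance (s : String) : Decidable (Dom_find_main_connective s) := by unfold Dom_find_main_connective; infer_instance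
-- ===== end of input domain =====

-- B re-implements A as a two-pass table-then-scan (precomputed depth table, then a scan
-- for the first top-level connective); same cost, alternative decomposition.

-- ===== PORT A =====
-- A: one while-loop carrying the depth counter, testing connectives inline at depth 0.
def pvGoA : List Char → Int → Int → Option Int × Option String
  | [], _, _ => (none, none)
  | ch :: rest, depth, i =>
    if ch = '(' then pvGoA rest (depth + 1) (i + 1)
    else if ch = ')' then pvGoA rest (depth - 1) (i + 1)
    else if depth = 0 then
      if ch = '-' ∧ rest.head? = some '>' then (some i, some "->")
      else if ch = '\\' ∧ rest.head? = some '/' then (some i, some "\\/")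
      else if ch = '&' then (some i, some "&")
      else pvGoA rest depth (i + 1)
    else pvGoA rest depth (i + 1)

def find_main_connective (s : String) : Option Int × Option String :=
  pvGoA s.toList 0 0

-- ===== PORT B =====
-- first pass: depth table (depth before each index)
def pvDepths : List Char → Int → List Int
  | [], _ => []
  | ch :: rest, d =>
    d :: pvDepths rest (if ch = '(' then d + 1 else if ch = ')' then d - 1 else d)

-- second pass: scan the depth table alongside the corresponding suffix of the string
def pvScanB : List Int → List Char → Int → Option Int × Option String
  | [], _, _ => (none, none)
  | d0 :: ds, cs, i =>
    if d0 = 0 then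
      if cs.head? = some '-' ∧ cs.tail.head? = some '>' then (some i, some "->")
      else if cs.head? = some '\\' ∧ cs.tail.head? = some '/' then (some i, some "\\/")
      else if cs.head? = some '&' then (some i, some "&")
      else pvScanB ds cs.tail (i + 1)
    else pvScanB ds cs.tail (i + 1)

def find_main_connective_alt (s : String) : Option Int × Option String :=
  pvScanB (pvDepths s.toList 0) s.toList 0

-- ===== PRECONDITION & SPEC =====
def Spec_find_main_connective (s : String) (out : Option Int × Option String) : Prop := out = find_main_connective_alt s
instance (s : String) (out : Option Int × Option String) : Decidable (Spec_find_main_connective s out) := by unfold Spec_find_main_connective; infer_instance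

-- ===== CLAIM (what is proved, stated in full; the proofs are below) =====
def Claim_equal_find_main_connective : Prop := ∀ (s : String), Dom_find_main_connective s → Spec_find_main_connective s (find_main_connective s)

-- ===== LEMMAS AND PROOFS =====
theorem pvGoA_eq_scan : ∀ (cs : List Char) (d i : Int),
    pvGoA cs d i = pvScanB (pvDepths cs d) cs i := by
  intro cs
  induction cs with
  | nil => intro d i; rfl
  | cons ch rest ih =>
    intro d i
    by_cases h1 : ch = '('
    · subst h1
      by_cases hd : d = 0 <;> simp [pvGoA, pvDepths, pvScanB, hd, ih]
    · by_cases h2 : ch = ')'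
      · subst h2
        by_cases hd : d = 0 <;> simp [pvGoA, pvDepths, pvScanB, h1, hd, ih]
      · by_cases hd : d = 0
        · simp only [pvGoA, pvDepths, pvScanB, List.head?, List.tail,
            Option.some.injEq, if_neg h1, if_neg h2, if_pos hd]
          split_ifs <;> first | rfl | exact ih d (i + 1)
        · simp [pvGoA, pvDepths, pvScanB, h1, h2, hd, ih]

-- ===== VERDICT (by name: the statement is the Claim_ definition above) =====
theorem find_main_connective_spec : Claim_equal_find_main_connective := by
  intro s _
  unfold Spec_find_main_connective find_main_connective find_main_connective_alt
  exact pvGoA_eq_scan s.toList 0 0
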